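-- pv_equiv track=rewrite | github.com/Cherrlyy/BAEKJOON | 2941.py | revise_alpha
-- ===== SOURCE A (Python) =====
-- dict_alpha = set(['c=', 'c-', 'dz=', 'd-', 'lj', 'nj', 's=', 'z='])
--
-- def revise_alpha(str, ans):
--     if len(str) == 0:
--         return ans
--
--     for i in range(2, 4):
--         tmp = str[0:i]
--         if tmp in dict_alpha:
--             ans.append(tmp)
--             return revise_alpha(str[i:], ans)
--     tmp = str[0]
--     ans.append(tmp)
--     return revise_alpha(str[1:], ans)
-- ===== SOURCE B (Python) =====
-- import re
--
-- _TOKEN = re.compile(r'c=|c-|dz=|d-|lj|nj|s=|z=|[\s\S]')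
--
-- def revise_alpha(str, ans):
--     ans.extend(_TOKEN.findall(str))
--     return ans
-- ===== Notes on version B (the rewrite author's own statement) =====
-- stated objective: idiomatic
-- what changed: replaces the explicit length-2-then-length-3 prefix dispatch recursion threading the accumulator with a single compiled regex alternation (tokens plus [\s\S] fallback) whose findall result is extended onto ans
import Mathlib
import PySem

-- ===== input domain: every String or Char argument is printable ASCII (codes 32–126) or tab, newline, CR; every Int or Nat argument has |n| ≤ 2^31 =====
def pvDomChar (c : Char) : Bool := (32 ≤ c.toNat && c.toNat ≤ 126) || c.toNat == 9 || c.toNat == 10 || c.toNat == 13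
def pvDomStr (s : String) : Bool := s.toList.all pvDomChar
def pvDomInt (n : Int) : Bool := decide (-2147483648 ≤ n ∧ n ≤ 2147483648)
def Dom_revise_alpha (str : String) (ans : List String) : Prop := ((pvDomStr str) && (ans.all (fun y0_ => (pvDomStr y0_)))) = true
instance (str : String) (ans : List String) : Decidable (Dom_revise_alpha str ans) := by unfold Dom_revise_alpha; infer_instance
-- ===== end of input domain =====

-- B tokenizes with one leftmost-first alternation pass (regex findall in Source B) and extends ans once,
-- instead of A's length-2-then-length-3 prefix dispatch recursion threading the accumulator.
-- Both Pythons mutate ans in place (append/extend); the equivalence proved here is about the return value.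

-- ===== PORT A =====
-- dict_alpha, as the set of token character lists
def dictAlpha : List (List Char) :=
  [['c','='], ['c','-'], ['d','z','='], ['d','-'], ['l','j'], ['n','j'], ['s','='], ['z','=']]

-- the body of revise_alpha, over the character list; the 2-iteration 'for i in range(2, 4)' is unrolled
def reviseAux (cs : List Char) (ans : List String) : List String :=
  if h : cs = [] then ans
  else if cs.take 2 ∈ dictAlpha then
    reviseAux (cs.drop 2) (ans ++ [String.ofList (cs.take 2)])
  else if cs.take 3 ∈ dictAlpha then
    reviseAux (cs.drop 3) (ans ++ [String.ofList (cs.take 3)])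
  else
    reviseAux (cs.drop 1) (ans ++ [String.ofList (cs.take 1)])
termination_by cs.length
decreasing_by
  all_goals
    have : 0 < cs.length := List.length_pos_iff.mpr h
    simp [List.length_drop]; omega

def revise_alpha (str : String) (ans : List String) : List String :=
  reviseAux str.toList ans

-- ===== PORT B =====
-- the regex alternation 'c=|c-|dz=|d-|lj|nj|s=|z='
def tokenPats : List (List Char) :=
  [['c','='], ['c','-'], ['d','z','='], ['d','-'], ['l','j'], ['n','j'], ['s','='], ['z','=']]

theorem tokenPats_pos {p : List Char} (h : p ∈ tokenPats) : 0 < p.length := by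
  fin_cases h <;> decide

-- findall: at each position, first alternative that matches; '[\s\S]' fallback matches one character
def findallTok (cs : List Char) : List String :=
  if h : cs = [] then []
  else
    match hf : tokenPats.find? (fun p => p.isPrefixOf cs) with
    | some p => String.ofList p :: findallTok (cs.drop p.length)
    | none => String.ofList (cs.take 1) :: findallTok (cs.drop 1)
termination_by cs.length
decreasing_by
  · have hp := tokenPats_pos (List.mem_of_find?_eq_some hf)
    have : 0 < cs.length := List.length_pos_iff.mpr h
    simp [List.length_drop]; omega
  · have : 0 < cs.length := List.length_pos_iff.mpr h
    simp [List.length_drop]; omega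

def revise_alpha_alt (str : String) (ans : List String) : List String :=
  ans ++ findallTok str.toList

-- ===== PRECONDITION & SPEC =====
def Spec_revise_alpha (str : String) (ans : List String) (out : List String) : Prop := out = revise_alpha_alt str ans
instance (str : String) (ans : List String) (out : List String) : Decidable (Spec_revise_alpha str ans out) := by unfold Spec_revise_alpha; infer_instance

-- ===== CLAIM (what is proved, stated in full; the proofs are below) =====
def Claim_equal_revise_alpha : Prop := ∀ (str : String) (ans : List String), Dom_revise_alpha str ans → Spec_revise_alpha str ans (revise_alpha str ans)

-- ===== LEMMAS AND PROOFS =====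

theorem isPrefixOf_take_eq {cs w : List Char} (h : w.isPrefixOf cs = true) :
    cs.take w.length = w := by
  have := List.isPrefixOf_iff_prefix.mp h
  exact (List.prefix_iff_eq_take.mp this).symm

theorem take_isPrefixOf {cs w : List Char} (h : cs.take w.length = w) :
    w.isPrefixOf cs = true := by
  rw [List.isPrefixOf_iff_prefix]
  conv_lhs => rw [← h]
  exact List.take_prefix _ _

theorem not_prefix_of_take_ne {cs w : List Char} (h : cs.take w.length ≠ w) :
    w.isPrefixOf cs = false := by
  cases hb : w.isPrefixOf cs with
  | false => rfl
  | true => exact absurd (isPrefixOf_take_eq hb) h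

theorem findallTok_some {cs p : List Char} (hcs : cs ≠ [])
    (hf : tokenPats.find? (fun q => q.isPrefixOf cs) = some p) :
    findallTok cs = String.ofList p :: findallTok (cs.drop p.length) := by
  rw [findallTok, dif_neg hcs]
  split
  · rename_i p' hh
    have := hf.symm.trans hh
    injection this with hpe
    subst hpe; rfl
  · rename_i hh
    rw [hf] at hh; cases hh

theorem findallTok_none {cs : List Char} (hcs : cs ≠ [])
    (hf : tokenPats.find? (fun q => q.isPrefixOf cs) = none) :
    findallTok cs = String.ofList (cs.take 1) :: findallTok (cs.drop 1) := by
  rw [findallTok, dif_neg hcs]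
  split
  · rename_i p' hh
    rw [hf] at hh; cases hh
  · rfl

-- if any two-char token is a prefix, it is cs.take 2; dz= prefix forces cs.take 2 = ['d','z']
theorem take2_of_take3 {cs : List Char} (h : cs.take 3 = ['d','z','=']) :
    cs.take 2 = ['d','z'] := by
  have h2 : cs.take 2 = (cs.take 3).take 2 := by
    rw [List.take_take]
    norm_num
  rw [h2, h]
  decide

theorem reviseAux_eq (cs : List Char) (ans : List String) :
    reviseAux cs ans = ans ++ findallTok cs := by
  by_cases hcs : cs = []
  · subst hcs; rw [reviseAux, findallTok]; simp
  · rw [reviseAux, dif_neg hcs]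
    have key2 : ∀ p : List Char, p.length = 2 → p.isPrefixOf cs = decide (cs.take 2 = p) := by
      intro p hp
      by_cases he : cs.take 2 = p
      · rw [← hp] at he
        simp [take_isPrefixOf he, hp ▸ he]
      · rw [not_prefix_of_take_ne (by rw [hp]; exact he)]
        simp [he]
    have hb1 : (['c','='] : List Char).isPrefixOf cs = decide (cs.take 2 = ['c','=']) := key2 _ rfl
    have hb2 : (['c','-'] : List Char).isPrefixOf cs = decide (cs.take 2 = ['c','-']) := key2 _ rfl
    have hb4 : (['d','-'] : List Char).isPrefixOf cs = decide (cs.take 2 = ['d','-']) := key2 _ rfl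
    have hb5 : (['l','j'] : List Char).isPrefixOf cs = decide (cs.take 2 = ['l','j']) := key2 _ rfl
    have hb6 : (['n','j'] : List Char).isPrefixOf cs = decide (cs.take 2 = ['n','j']) := key2 _ rfl
    have hb7 : (['s','='] : List Char).isPrefixOf cs = decide (cs.take 2 = ['s','=']) := key2 _ rfl
    have hb8 : (['z','='] : List Char).isPrefixOf cs = decide (cs.take 2 = ['z','=']) := key2 _ rfl
    have hb3 : (['d','z','='] : List Char).isPrefixOf cs = decide (cs.take 3 = ['d','z','=']) := by
      by_cases he : cs.take 3 = ['d','z','=']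
      · rw [take_isPrefixOf (by exact he)]; simp [he]
      · rw [not_prefix_of_take_ne (by exact he)]; simp [he]
    by_cases h2 : cs.take 2 ∈ dictAlpha
    · rw [if_pos h2]
      have h2' := h2
      simp only [dictAlpha, List.mem_cons, List.not_mem_nil, or_false] at h2'
      rcases h2' with h|h|h|h|h|h|h|h <;>
      first
      | · exfalso
          have hl := congrArg List.length h
          simp at hl
          omega
      | · have hb3' : (['d','z','='] : List Char).isPrefixOf cs = false := by
            rw [hb3]
            simp only [decide_eq_false_iff_not]
            intro hh
            rw [take2_of_take3 hh] at h
            exact absurd h (by decide)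
          have hfind : tokenPats.find? (fun q => q.isPrefixOf cs) = some (cs.take 2) := by
            rw [h] at hb1 hb2 hb4 hb5 hb6 hb7 hb8 ⊢
            simp [tokenPats, List.find?, hb1, hb2, hb3', hb4, hb5, hb6, hb7, hb8]
          rw [findallTok_some hcs hfind]
          have hlen : (cs.take 2).length = 2 := by rw [h]; rfl
          rw [hlen, reviseAux_eq (cs.drop 2) (ans ++ [String.ofList (cs.take 2)])]
          simp
    · rw [if_neg h2]
      by_cases h3 : cs.take 3 ∈ dictAlpha
      · rw [if_pos h3]
        have h3' := h3
        simp only [dictAlpha, List.mem_cons, List.not_mem_nil, or_false] at h3'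
        have short : ∀ w : List Char, cs.take 3 = w → w.length = 2 → cs.take 2 = w := by
          intro w hh hw
          have hlen := congrArg List.length hh
          simp [hw] at hlen
          have hcs3 : cs.take 3 = cs := List.take_of_length_le (by omega)
          rw [hcs3] at hh
          subst hh
          exact List.take_of_length_le (by omega)
        rcases h3' with h|h|h|h|h|h|h|h <;>
        first
        | · exact absurd (show cs.take 2 ∈ dictAlpha by rw [short _ h rfl]; decide) h2
        | · -- the dz= case
            have ht2 := take2_of_take3 h
            have hb1' : (['c','='] : List Char).isPrefixOf cs = false := by
              rw [key2 _ rfl, ht2]; decide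
            have hb2' : (['c','-'] : List Char).isPrefixOf cs = false := by
              rw [key2 _ rfl, ht2]; decide
            have hb3' : (['d','z','='] : List Char).isPrefixOf cs = true := by
              rw [hb3]; simp [h]
            have hfind : tokenPats.find? (fun q => q.isPrefixOf cs) = some (cs.take 3) := by
              rw [h]
              simp [tokenPats, List.find?, hb1', hb2', hb3']
            rw [findallTok_some hcs hfind]
            have hlen : (cs.take 3).length = 3 := by rw [h]; rfl
            rw [hlen, reviseAux_eq (cs.drop 3) (ans ++ [String.ofList (cs.take 3)])]
            simp
      · rw [if_neg h3]
        have n1 : cs.take 2 ≠ ['c','='] := fun hh => h2 (by rw [hh]; decide)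
        have n2 : cs.take 2 ≠ ['c','-'] := fun hh => h2 (by rw [hh]; decide)
        have n4 : cs.take 2 ≠ ['d','-'] := fun hh => h2 (by rw [hh]; decide)
        have n5 : cs.take 2 ≠ ['l','j'] := fun hh => h2 (by rw [hh]; decide)
        have n6 : cs.take 2 ≠ ['n','j'] := fun hh => h2 (by rw [hh]; decide)
        have n7 : cs.take 2 ≠ ['s','='] := fun hh => h2 (by rw [hh]; decide)
        have n8 : cs.take 2 ≠ ['z','='] := fun hh => h2 (by rw [hh]; decide)
        have n3 : cs.take 3 ≠ ['d','z','='] := fun hh => h3 (by rw [hh]; decide)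
        have hfind : tokenPats.find? (fun q => q.isPrefixOf cs) = none := by
          simp [tokenPats, List.find?, hb1, hb2, hb3, hb4, hb5, hb6, hb7, hb8,
            n1, n2, n3, n4, n5, n6, n7, n8]
        rw [findallTok_none hcs hfind,
          reviseAux_eq (cs.drop 1) (ans ++ [String.ofList (cs.take 1)])]
        simp
termination_by cs.length
decreasing_by
  all_goals
    have : 0 < cs.length := List.length_pos_iff.mpr hcs
    simp [List.length_drop]; omega

-- ===== VERDICT (by name: the statement is the Claim_ definition above) =====
theorem revise_alpha_spec : Claim_equal_revise_alpha := by
  intro str ans _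
  unfold Spec_revise_alpha revise_alpha revise_alpha_alt
  exact reviseAux_eq _ _
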